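-- pv_equiv track=rewrite | github.com/maxcrave/SSC | app01/views.py | filter_sanxing
-- ===== SOURCE A (Python) =====
-- def filter_sanxing(danma,last_number,danma_2):
--     SSC_NUM = []
--
--     for i in range(0, 1000):
--         num = '%03d' % i
--         SSC_NUM.append(num)
--
--     SSC_NUMBER = []
--
--     temp1 = []
--     for number in SSC_NUM:
--         for i in danma:
--             if i in number:
--                 temp1.append(number)
--                 break
--
--     SSC_NUMBER_DICT = {}
--     for number in temp1:
--         SSC_NUMBER_DICT[number] = {}
--         for i in danma:
--             SSC_NUMBER_DICT[number].update({i: number.count(i)})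
--
--     for number, v_dict in SSC_NUMBER_DICT.items():
--         temp2_count = 0
--         for k, v in v_dict.items():
--             if v == 1:
--                 temp2_count += 1
--         if temp2_count != 3:
--             SSC_NUMBER.append(number)
--
--     SSC_NUMBER = sorted(SSC_NUMBER)
--
--     temp2 = []
--
--     for number in SSC_NUMBER:
--         for i in last_number:
--             if i in number:
--                 temp2.append(number)
--                 break
--
--     SSC_NUMBER = sorted(temp2)
--
--     temp3 = []
--     for number in SSC_NUMBER:
--         last_two = number[1:]
--         for n in danma_2:
--             if n in last_two:
--                 temp3.append(number)
--                 break
--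
--     SSC_NUMBER = sorted(temp3)
--     SSC_SIZE = len(SSC_NUMBER)
--
--     SSC_NUM = ' '.join(SSC_NUMBER)
--     SSC_NUM_Buffer = SSC_NUM
--
--     return SSC_SIZE,SSC_NUM_Buffer
-- ===== SOURCE B (Python) =====
-- def filter_sanxing(danma, last_number, danma_2):
--     # One fused pass over range(1000); the staged temp lists, the nested
--     # count-dict and the redundant sorts of A disappear.  Candidate substrings
--     # longer than 3 characters can never occur in a 3-digit string, so the
--     # membership lists are deduped and prefiltered once.
--     distinct = list(dict.fromkeys(danma))
--     cand_dm = [d for d in distinct if len(d) <= 3]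
--     cand_ln = [l for l in dict.fromkeys(last_number) if len(l) <= 3]
--     cand_d2 = [d for d in dict.fromkeys(danma_2) if len(d) <= 3]
--     result = []
--     for i in range(1000):
--         num = '%03d' % i
--         if (any(d in num for d in cand_dm)
--                 and sum(1 for d in distinct if num.count(d) == 1) != 3
--                 and any(l in num for l in cand_ln)
--                 and any(d in num[1:] for d in cand_d2)):
--             result.append(num)
--     return len(result), ' '.join(result)
-- ===== Notes on version B (the rewrite author's own statement) =====
-- stated objective: faster
-- what changed: Replaces A's four staged passes (temp1, the nested per-number count dict, temp2, temp3) and three redundant sorts with one fused filtering loop over range(1000), whose membership tests run over once-built deduped candidate lists prefiltered to entries of length <= 3 (longer strings can never occur in a 3-char number).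
import Mathlib
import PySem

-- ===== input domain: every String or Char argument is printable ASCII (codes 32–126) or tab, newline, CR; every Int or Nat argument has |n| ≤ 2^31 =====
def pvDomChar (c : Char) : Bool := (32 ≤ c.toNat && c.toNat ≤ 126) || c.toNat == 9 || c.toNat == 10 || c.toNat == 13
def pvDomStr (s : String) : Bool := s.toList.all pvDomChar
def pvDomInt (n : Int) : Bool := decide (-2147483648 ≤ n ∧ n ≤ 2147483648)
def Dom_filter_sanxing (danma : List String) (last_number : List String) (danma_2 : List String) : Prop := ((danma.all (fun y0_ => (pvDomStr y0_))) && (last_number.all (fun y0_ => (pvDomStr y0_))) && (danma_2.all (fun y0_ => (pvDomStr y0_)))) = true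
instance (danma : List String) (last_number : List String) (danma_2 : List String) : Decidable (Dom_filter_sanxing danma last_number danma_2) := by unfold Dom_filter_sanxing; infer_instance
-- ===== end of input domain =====

-- B replaces A's four staged passes (temp1, the nested per-number count dict, temp2, temp3) and its
-- three redundant sorts by one fused filtering loop over range(1000) whose membership tests use
-- once-built deduped candidate lists prefiltered to length ≤ 3 — measurably faster on long inputs.

-- ===== PORT A =====
-- '%03d' % i : zero-pad str(i) to width 3 (exact for every int at width 3)
def pvFmt3 (i : Int) : String := PySem.Str.zfill (PySem.Int.toStr i) 3

def filter_sanxing (danma : List String) (last_number : List String) (danma_2 : List String) : Int × String :=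
  -- SSC_NUM = []; for i in range(0, 1000): SSC_NUM.append('%03d' % i)
  let ssc_num : List String :=
    (PySem.List.pyRange 0 1000 1).foldl (fun acc i => acc ++ [pvFmt3 i]) []
  -- temp1: for number in SSC_NUM: for i in danma: if i in number: append; break
  let temp1 : List String :=
    ssc_num.foldl (fun acc number =>
      if danma.any (fun i => PySem.Str.isIn i number) then acc ++ [number] else acc) []
  -- SSC_NUMBER_DICT: outer dict keyed by number; inner dict {i: number.count(i)} built by update
  let sscDict : PySem.Dict String (PySem.Dict String Int) :=
    temp1.foldl (fun d number =>
      danma.foldl (fun d i =>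
          d.insert number ((d.getD number PySem.Dict.empty).insert i (PySem.Str.count number i : Int)))
        (d.insert number PySem.Dict.empty)) PySem.Dict.empty
  -- for number, v_dict in SSC_NUMBER_DICT.items(): count values == 1; keep if != 3
  let ssc_number1 : List String :=
    sscDict.items.foldl (fun acc p =>
      let cnt : Int := p.2.items.foldl (fun c kv => if kv.2 == 1 then c + 1 else c) 0
      if cnt ≠ 3 then acc ++ [p.1] else acc) []
  let ssc_number1 := PySem.List.sorted ssc_number1 (fun x => x)
  -- temp2: keep numbers containing some last_number digit
  let temp2 : List String :=
    ssc_number1.foldl (fun acc number =>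
      if last_number.any (fun i => PySem.Str.isIn i number) then acc ++ [number] else acc) []
  let ssc_number2 := PySem.List.sorted temp2 (fun x => x)
  -- temp3: keep numbers whose last two digits contain some danma_2 digit
  let temp3 : List String :=
    ssc_number2.foldl (fun acc number =>
      let last_two := PySem.Str.slice number (some 1) none
      if danma_2.any (fun n => PySem.Str.isIn n last_two) then acc ++ [number] else acc) []
  let ssc_number3 := PySem.List.sorted temp3 (fun x => x)
  ((ssc_number3.length : Int), PySem.Str.join " " ssc_number3)

-- ===== PORT B =====
def filter_sanxing_alt (danma : List String) (last_number : List String) (danma_2 : List String) : Int × String :=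
  -- distinct = list(dict.fromkeys(danma)); cand_* = deduped lists without entries longer than 3
  let distinct := PySem.List.dedup danma
  let cand_dm := distinct.filter (fun d => decide (PySem.Str.len d ≤ 3))
  let cand_ln := (PySem.List.dedup last_number).filter (fun l => decide (PySem.Str.len l ≤ 3))
  let cand_d2 := (PySem.List.dedup danma_2).filter (fun d => decide (PySem.Str.len d ≤ 3))
  -- one fused pass: for i in range(1000), test all four conditions on '%03d' % i
  let result : List String :=
    (PySem.List.pyRange 0 1000 1).foldl (fun acc i =>
      let num := pvFmt3 i
      if cand_dm.any (fun d => PySem.Str.isIn d num)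
          && !((distinct.countP (fun d => PySem.Str.count num d == 1) : Int) == 3)
          && cand_ln.any (fun l => PySem.Str.isIn l num)
          && cand_d2.any (fun d => PySem.Str.isIn d (PySem.Str.slice num (some 1) none))
      then acc ++ [num] else acc) []
  ((result.length : Int), PySem.Str.join " " result)

-- ===== PRECONDITION & SPEC =====
def Spec_filter_sanxing (danma : List String) (last_number : List String) (danma_2 : List String) (out : Int × String) : Prop := out = filter_sanxing_alt danma last_number danma_2
instance (danma : List String) (last_number : List String) (danma_2 : List String) (out : Int × String) : Decidable (Spec_filter_sanxing danma last_number danma_2 out) := by unfold Spec_filter_sanxing; infer_instance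

-- ===== CLAIM (what is proved, stated in full; the proofs are below) =====
def Claim_equal_filter_sanxing : Prop := ∀ (danma : List String) (last_number : List String) (danma_2 : List String), Dom_filter_sanxing danma last_number danma_2 → Spec_filter_sanxing danma last_number danma_2 (filter_sanxing danma last_number danma_2)

-- ===== LEMMAS AND PROOFS =====

-- the generated list '000' … '999'
def pvNums : List String := (PySem.List.pyRange 0 1000 1).map pvFmt3

set_option maxRecDepth 100000 in
lemma pvNums_chain : List.IsChain (fun a b : String => a.toList < b.toList) pvNums := by decide

lemma pvNums_pairwise : pvNums.Pairwise (fun a b : String => a < b) := by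
  have h : pvNums.Pairwise (fun a b : String => a.toList < b.toList) := by
    have : Trans (fun a b : String => a.toList < b.toList)
        (fun a b : String => a.toList < b.toList) (fun a b : String => a.toList < b.toList) :=
      ⟨fun hab hbc => lt_trans hab hbc⟩
    exact pvNums_chain.pairwise
  exact h.imp (fun hab => String.lt_iff_toList_lt.mpr hab)

-- the inner danma loop only ever touches key `number` of the outer dict
lemma pvInnerFold (number : String) (c : String → Int) (l : List String) :
    ∀ (d : PySem.Dict String (PySem.Dict String Int)) (e : PySem.Dict String Int),
      l.foldl (fun d i => d.insert number ((d.getD number PySem.Dict.empty).insert i (c i)))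
          (d.insert number e)
        = d.insert number (l.foldl (fun di i => di.insert i (c i)) e) := by
  induction l with
  | nil => intro d e; simp
  | cons x xs ih =>
      intro d e
      simp only [List.foldl_cons, PySem.Dict.getD_insert_self, PySem.Dict.insert_insert_self]
      exact ih d (e.insert x (c x))

-- an insert loop whose value depends only on the key: items are the dedup'd keys with their values
lemma pvConstItems (c : String → Int) (l : List String) :
    ∀ (s : List String) (d : PySem.Dict String Int),
      d.items = s.map (fun i => (i, c i)) →
      (l.foldl (fun di i => di.insert i (c i)) d).items
        = (PySem.Set.update s l).map (fun i => (i, c i)) := by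
  induction l with
  | nil => intro s d h; simpa [PySem.Set.update] using h
  | cons x xs ih =>
      intro s d h
      have hkeys : d.keys = s := by
        simp [PySem.Dict.keys, h, Function.comp_def]
      by_cases hx : x ∈ s
      · have hc : d.contains x = true := by
          rw [PySem.Dict.contains_iff_mem_keys, hkeys]; exact hx
        have hitems : (d.insert x (c x)).items = s.map (fun i => (i, c i)) := by
          rw [PySem.Dict.items_insert_of_contains _ _ hc, h, List.map_map]
          apply List.map_congr_left
          intro i _
          by_cases hix : i = x
          · subst hix; simp
          · simp [Function.comp, hix]
        have hadd : PySem.Set.add s x = s := by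
          simp [PySem.Set.add, PySem.Set.contains, hx]
        simp only [List.foldl_cons, PySem.Set.update, hadd]
        simpa [PySem.Set.update] using ih s (d.insert x (c x)) hitems
      · have hc : d.contains x = false := by
          rw [Bool.eq_false_iff]
          intro hcon
          exact hx (by rwa [PySem.Dict.contains_iff_mem_keys, hkeys] at hcon)
        have hitems : (d.insert x (c x)).items = (s ++ [x]).map (fun i => (i, c i)) := by
          rw [PySem.Dict.items_insert_of_not_contains _ _ hc, h]; simp
        have hadd : PySem.Set.add s x = s ++ [x] := by
          simp [PySem.Set.add, PySem.Set.contains, hx]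
        simp only [List.foldl_cons, PySem.Set.update, hadd]
        simpa [PySem.Set.update] using ih (s ++ [x]) (d.insert x (c x)) hitems

-- the four tests, as predicates on a candidate number
def pvP1 (danma : List String) (n : String) : Bool := danma.any (fun i => PySem.Str.isIn i n)
def pvQ (danma : List String) (n : String) : Bool :=
  !(((PySem.List.dedup danma).countP (fun d => PySem.Str.count n d == 1) : Int) == 3)
def pvPL (last_number : List String) (n : String) : Bool := last_number.any (fun i => PySem.Str.isIn i n)
def pvP2 (danma_2 : List String) (n : String) : Bool :=
  danma_2.any (fun d => PySem.Str.isIn d (PySem.Str.slice n (some 1) none))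

-- B's deduped, length-prefiltered membership list
def pvCand (l : List String) : List String :=
  (PySem.List.dedup l).filter (fun d => decide (PySem.Str.len d ≤ 3))

lemma pvAlt_eq (danma last_number danma_2 : List String) :
    filter_sanxing_alt danma last_number danma_2 =
      let res := pvNums.filter (fun n =>
        pvP1 (pvCand danma) n && pvQ danma n && pvPL (pvCand last_number) n && pvP2 (pvCand danma_2) n)
      ((res.length : Int), PySem.Str.join " " res) := by
  unfold filter_sanxing_alt
  dsimp only
  rw [← List.foldl_map (f := pvFmt3) (g := fun acc num =>
        if ((PySem.List.dedup danma).filter (fun d => decide (PySem.Str.len d ≤ 3))).any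
              (fun d => PySem.Str.isIn d num)
            && !(((PySem.List.dedup danma).countP (fun d => PySem.Str.count num d == 1) : Int) == 3)
            && ((PySem.List.dedup last_number).filter (fun l => decide (PySem.Str.len l ≤ 3))).any
              (fun l => PySem.Str.isIn l num)
            && ((PySem.List.dedup danma_2).filter (fun d => decide (PySem.Str.len d ≤ 3))).any
              (fun d => PySem.Str.isIn d (PySem.Str.slice num (some 1) none))
        then acc ++ [num] else acc)]
  rw [show (PySem.List.pyRange 0 1000 1).map pvFmt3 = pvNums from rfl]
  rw [PySem.List.foldl_append_if _ (fun n => n)]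
  simp only [List.nil_append, List.map_id']
  rfl

-- A's dict-stage condition, as it falls out of the count dict
def pvQA (danma : List String) (n : String) : Bool :=
  decide (¬ ((0 : Int) + ((((PySem.Set.ofList danma).map (fun i => (i, (PySem.Str.count n i : Int)))).countP (fun kv => kv.2 == 1) : Int)) = 3))

def pvInner (danma : List String) (number : String) : PySem.Dict String Int :=
  danma.foldl (fun di i => di.insert i ((PySem.Str.count number i : Int))) PySem.Dict.empty

lemma pvFoldlAppendIfP {α β : Type} (P : α → Prop) [DecidablePred P] (f : α → β) (l : List α) :
    ∀ (acc : List β),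
      l.foldl (fun acc x => if P x then acc ++ [f x] else acc) acc
        = acc ++ (l.filter (fun x => decide (P x))).map f := by
  induction l with
  | nil => intro acc; simp
  | cons x xs ih =>
      intro acc
      by_cases h : P x <;> simp [h, ih]

set_option maxRecDepth 10000 in
lemma pvA_eq (danma last_number danma_2 : List String) :
    filter_sanxing danma last_number danma_2 =
      let res := PySem.List.sorted
        (List.filter (pvP2 danma_2)
          (PySem.List.sorted
            (List.filter (pvPL last_number)
              (PySem.List.sorted
                (List.filter (pvQA danma) (List.filter (pvP1 danma) pvNums))
                (fun x => x)))
            (fun x => x)))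
        (fun x => x)
      ((res.length : Int), PySem.Str.join " " res) := by
  have hin : ∀ n : String, (pvInner danma n).items
      = (PySem.Set.ofList danma).map (fun i => (i, (PySem.Str.count n i : Int))) := by
    intro n
    have h := pvConstItems (fun i => (PySem.Str.count n i : Int)) danma [] PySem.Dict.empty (by rfl)
    simpa [PySem.Set.update, ← PySem.Set.ofList_eq_foldl, pvInner] using h
  unfold filter_sanxing
  dsimp only
  rw [PySem.List.foldl_append_singleton_eq_map]
  rw [show ([] : List String) ++ (PySem.List.pyRange 0 1000 1).map pvFmt3 = pvNums from by simp [pvNums]]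
  rw [PySem.List.foldl_append_if _ (fun n => n)]
  simp only [List.nil_append, List.map_id']
  rw [PySem.List.foldl_append_if _ (fun n => n)]
  simp only [List.nil_append, List.map_id']
  rw [PySem.List.foldl_append_if _ (fun n => n)]
  simp only [List.nil_append, List.map_id']
  rw [show (fun (d : PySem.Dict String (PySem.Dict String Int)) (number : String) =>
        danma.foldl (fun d i =>
            d.insert number ((d.getD number PySem.Dict.empty).insert i (PySem.Str.count number i : Int)))
          (d.insert number PySem.Dict.empty))
      = (fun d number => d.insert number (pvInner danma number)) from by
        funext d number
        exact pvInnerFold number _ danma d PySem.Dict.empty]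
  have hnd : (List.filter (fun number => danma.any (fun i => PySem.Str.isIn i number)) pvNums).Nodup :=
    (pvNums_pairwise.imp ne_of_lt).filter _
  rw [PySem.Dict.items_foldl_insert_fresh _ (fun a => a) (pvInner danma) PySem.Dict.empty
        (fun a _ => rfl) (by simpa using hnd)]
  rw [show (PySem.Dict.empty : PySem.Dict String (PySem.Dict String Int)).items = [] from rfl]
  simp only [List.nil_append, List.foldl_map]
  simp only [hin, PySem.List.foldl_if_add_one]
  rw [pvFoldlAppendIfP (fun n : String => ((0 : Int) + ((((PySem.Set.ofList danma).map (fun i => (i, (PySem.Str.count n i : Int)))).countP (fun kv => kv.2 == 1) : Int)) ≠ 3)) (fun n => n)]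
  simp only [List.nil_append, List.map_id']
  rfl

lemma pvIsInLen {d s : String} (h : PySem.Str.isIn d s = true) : PySem.Str.len d ≤ (s.toList.length : Int) := by
  have hle := ((PySem.Str.isIn_iff_infix d s).mp h).length_le
  rw [PySem.Str.len_eq]
  exact_mod_cast hle

lemma pvAnyCand (l : List String) (f : String → Bool) (h : ∀ d, f d = true → PySem.Str.len d ≤ 3) :
    (pvCand l).any f = l.any f := by
  rw [Bool.eq_iff_iff]
  simp only [List.any_eq_true, pvCand, List.mem_filter, PySem.List.mem_dedup]
  constructor
  · rintro ⟨d, ⟨hd, _⟩, hf⟩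
    exact ⟨d, hd, hf⟩
  · rintro ⟨d, hd, hf⟩
    exact ⟨d, ⟨hd, by simpa using h d hf⟩, hf⟩

set_option maxRecDepth 100000 in
lemma pvNums_len : ∀ n ∈ pvNums, n.toList.length = 3 := by decide

set_option maxRecDepth 100000 in
lemma pvNums_slice_len : ∀ n ∈ pvNums, (PySem.Str.slice n (some 1) none).toList.length ≤ 3 := by decide

lemma pvDecNe (a : Int) : decide (¬ ((0 : Int) + a = 3)) = !(a == 3) := by
  by_cases h : a = 3 <;> simp [h]

lemma pvQA_eq_pvQ (danma : List String) (n : String) : pvQA danma n = pvQ danma n := by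
  have hc : (((PySem.Set.ofList danma).map (fun i => (i, (PySem.Str.count n i : Int)))).countP (fun kv => kv.2 == 1))
      = (PySem.List.dedup danma).countP (fun d => PySem.Str.count n d == 1) := by
    rw [List.countP_map, PySem.List.dedup_eq_ofList]
    apply List.countP_congr
    intro i _
    simp [Function.comp, Nat.cast_eq_one]
  unfold pvQA pvQ
  rw [hc]
  exact pvDecNe _

theorem filter_sanxing_eq (danma last_number danma_2 : List String) :
    filter_sanxing danma last_number danma_2 = filter_sanxing_alt danma last_number danma_2 := by
  rw [pvA_eq, pvAlt_eq]
  dsimp only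
  have hpw1 : (List.filter (pvQA danma) (List.filter (pvP1 danma) pvNums)).Pairwise
      (fun a b : String => a < b) := (pvNums_pairwise.filter _).filter _
  rw [PySem.List.sorted_eq_self_of_pairwise _ _ (hpw1.imp le_of_lt)]
  have hpw2 : (List.filter (pvPL last_number)
      (List.filter (pvQA danma) (List.filter (pvP1 danma) pvNums))).Pairwise
      (fun a b : String => a < b) := hpw1.filter _
  rw [PySem.List.sorted_eq_self_of_pairwise _ _ (hpw2.imp le_of_lt)]
  have hpw3 := hpw2.filter (pvP2 danma_2)
  rw [PySem.List.sorted_eq_self_of_pairwise _ _ (hpw3.imp le_of_lt)]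
  have hflt : List.filter (pvP2 danma_2) (List.filter (pvPL last_number)
        (List.filter (pvQA danma) (List.filter (pvP1 danma) pvNums)))
      = List.filter (fun n =>
          pvP1 (pvCand danma) n && pvQ danma n && pvPL (pvCand last_number) n && pvP2 (pvCand danma_2) n)
          pvNums := by
    simp only [List.filter_filter]
    apply List.filter_congr
    intro n hn
    have e1 : pvP1 (pvCand danma) n = pvP1 danma n :=
      pvAnyCand danma _ (fun d hd => by
        have := pvIsInLen hd
        rw [pvNums_len n hn] at this
        exact this)
    have e2 : pvPL (pvCand last_number) n = pvPL last_number n :=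
      pvAnyCand last_number _ (fun d hd => by
        have := pvIsInLen hd
        rw [pvNums_len n hn] at this
        exact this)
    have e3 : pvP2 (pvCand danma_2) n = pvP2 danma_2 n :=
      pvAnyCand danma_2 _ (fun d hd => by
        have h1 := pvIsInLen hd
        have h2 := pvNums_slice_len n hn
        omega)
    rw [e1, e2, e3, pvQA_eq_pvQ]
    cases h1 : pvP1 danma n <;> cases h2 : pvQ danma n <;> cases h3 : pvPL last_number n <;>
      cases h4 : pvP2 danma_2 n <;> rfl
  rw [hflt]

-- ===== VERDICT (by name: the statement is the Claim_ definition above) =====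
theorem filter_sanxing_spec : Claim_equal_filter_sanxing := by
  intro danma last_number danma_2 _
  show _ = _
  exact filter_sanxing_eq danma last_number danma_2
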